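-- pv_equiv track=rewrite | github.com/lymagics/Python | Cryptography/gost_28147_89.py | convert_to_8
-- ===== SOURCE A (Python) =====
-- def convert_to_8(num_msg:int):
--     msg_len = len(num_msg)
--     missing = 0
--     while (msg_len % 8 == 0) == False:
--         msg_len += 1
--         missing += 1
--     for i in range(missing):
--         num_msg.append(0)
--     return num_msg,missing
-- ===== SOURCE B (Python) =====
-- def convert_to_8(num_msg):
--     missing = (-len(num_msg)) % 8
--     num_msg.extend([0] * missing)
--     return num_msg, missing
-- ===== Notes on version B (the rewrite author's own statement) =====
-- stated objective: idiomatic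
-- what changed: Replaces the incrementing while-loop that searches for the next multiple of 8 with the closed form (-len) % 8 and a single extend, instead of counting up and appending in a loop.
import Mathlib
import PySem

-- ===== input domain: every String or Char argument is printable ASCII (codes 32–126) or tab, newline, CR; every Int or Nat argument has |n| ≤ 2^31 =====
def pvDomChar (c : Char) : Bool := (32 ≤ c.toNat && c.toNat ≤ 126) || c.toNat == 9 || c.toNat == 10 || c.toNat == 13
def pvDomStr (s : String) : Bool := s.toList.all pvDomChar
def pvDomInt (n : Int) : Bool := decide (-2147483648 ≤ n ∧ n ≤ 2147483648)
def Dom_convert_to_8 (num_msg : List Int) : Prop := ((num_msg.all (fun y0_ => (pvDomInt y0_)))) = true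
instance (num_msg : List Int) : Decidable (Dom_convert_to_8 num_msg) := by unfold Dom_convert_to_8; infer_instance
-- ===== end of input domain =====

-- B replaces A's counting while-loop with the closed form (-len) % 8 and a single extend (idiomatic).
-- Note: the Python A mutates num_msg in place (appends); B performs the same in-place mutation.

-- ===== PORT A =====
-- A's while-loop: increment msg_len and missing until msg_len % 8 == 0.
def convert_to_8_loop (msg_len missing : Nat) : Nat :=
  if msg_len % 8 = 0 then missing
  else convert_to_8_loop (msg_len + 1) (missing + 1)
termination_by (8 - msg_len % 8) % 8
decreasing_by omega

def convert_to_8 (num_msg : List Int) : List Int × Int :=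
  let msg_len := num_msg.length
  let missing := convert_to_8_loop msg_len 0
  -- for i in range(missing): num_msg.append(0)
  let num_msg := (PySem.List.pyRange 0 (missing : Int) 1).foldl (fun acc _ => acc ++ [0]) num_msg
  (num_msg, (missing : Int))

-- ===== PORT B =====
def convert_to_8_alt (num_msg : List Int) : List Int × Int :=
  let missing := PySem.Int.mod (-(num_msg.length : Int)) 8
  (num_msg ++ List.replicate missing.toNat 0, missing)

-- ===== PRECONDITION & SPEC =====
def Spec_convert_to_8 (num_msg : List Int) (out : List Int × Int) : Prop := out = convert_to_8_alt num_msg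
instance (num_msg : List Int) (out : List Int × Int) : Decidable (Spec_convert_to_8 num_msg out) := by unfold Spec_convert_to_8; infer_instance

-- ===== CLAIM (what is proved, stated in full; the proofs are below) =====
def Claim_equal_convert_to_8 : Prop := ∀ (num_msg : List Int), Dom_convert_to_8 num_msg → Spec_convert_to_8 num_msg (convert_to_8 num_msg)

-- ===== LEMMAS AND PROOFS =====

theorem convert_to_8_loop_eq (msg_len missing : Nat) :
    convert_to_8_loop msg_len missing = missing + (8 - msg_len % 8) % 8 := by
  fun_induction convert_to_8_loop msg_len missing with
  | case1 m acc h => omega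
  | case2 m acc h ih => rw [ih]; omega

theorem foldl_append_zero (l : List Int) (acc : List Int) :
    l.foldl (fun acc _ => acc ++ [(0 : Int)]) acc = acc ++ List.replicate l.length 0 := by
  induction l generalizing acc with
  | nil => simp
  | cons x xs ih =>
      simp [List.foldl_cons, ih, List.replicate_succ, List.append_assoc]

theorem mod_neg_len (n : Nat) :
    PySem.Int.mod (-(n : Int)) 8 = (((8 - n % 8) % 8 : Nat) : Int) := by
  rw [PySem.Int.mod_eq_emod_of_pos (by norm_num)]
  omega

-- ===== VERDICT (by name: the statement is the Claim_ definition above) =====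
theorem convert_to_8_spec : Claim_equal_convert_to_8 := by
  intro num_msg _
  unfold Spec_convert_to_8 convert_to_8 convert_to_8_alt
  simp only [convert_to_8_loop_eq, Nat.zero_add, foldl_append_zero, mod_neg_len,
    PySem.List.pyRange_zero_natCast]
  simp
  omega
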